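-- pv_equiv track=rewrite | github.com/zmetz1/zoe-group-site | scripts/fetch_demo_content.py | find_best_version
-- ===== SOURCE A (Python) =====
-- def find_best_version(site_version, available_versions):
--     """
--     Find highest available version <= site_version
--
--     Examples:
--     - site=0.6.3, available=[0.6.0, 0.6.1, 0.7.0] -> returns 0.6.1
--     - site=0.5.9, available=[0.6.0, 0.6.1, 0.7.0] -> returns None (no compatible)
--     - site=0.8.0, available=[0.6.0, 0.7.0] -> returns 0.7.0
--
--     Args:
--         site_version: Version string from site config (e.g., "0.6.3")
--         available_versions: List of available version strings
--
--     Returns: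
--         str: Best matching version string
--         None: If no compatible version exists
--     """
--     def parse_version(v):
--         parts = v.split('.')
--         return tuple(int(p) for p in parts)
--
--     try:
--         site_v = parse_version(site_version)
--     except (ValueError, AttributeError):
--         return None
--
--     candidates = []
--
--     for v in available_versions:
--         try:
--             v_parsed = parse_version(v)
--             if v_parsed <= site_v:
--                 candidates.append((v_parsed, v))
--         except (ValueError, AttributeError):
--             continue
--
--     if not candidates:
--         return None
--
--     # Return the highest compatible version
--     return max(candidates, key=lambda x: x[0])[1]
-- ===== SOURCE B (Python) =====
-- def find_best_version(site_version, available_versions):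
--     """One-pass running-best re-implementation (no candidate list, no max)."""
--     def parse_version(v):
--         return tuple(int(p) for p in v.split('.'))
--
--     try:
--         site_v = parse_version(site_version)
--     except (ValueError, AttributeError):
--         return None
--
--     best = None  # None or (parsed_tuple, original_string)
--     for v in available_versions:
--         try:
--             vp = parse_version(v)
--         except (ValueError, AttributeError):
--             continue
--         if vp <= site_v and (best is None or vp > best[0]):
--             best = (vp, v)
--     return best[1] if best is not None else None
-- ===== Notes on version B (the rewrite author's own statement) =====
-- stated objective: simpler
-- what changed: Replaced A's two-pass build-candidate-list-then-max structure with a single pass that keeps a running best (parsed tuple, string), updating on strictly greater parsed tuple to preserve max's first-occurrence tie-break.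
import Mathlib
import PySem

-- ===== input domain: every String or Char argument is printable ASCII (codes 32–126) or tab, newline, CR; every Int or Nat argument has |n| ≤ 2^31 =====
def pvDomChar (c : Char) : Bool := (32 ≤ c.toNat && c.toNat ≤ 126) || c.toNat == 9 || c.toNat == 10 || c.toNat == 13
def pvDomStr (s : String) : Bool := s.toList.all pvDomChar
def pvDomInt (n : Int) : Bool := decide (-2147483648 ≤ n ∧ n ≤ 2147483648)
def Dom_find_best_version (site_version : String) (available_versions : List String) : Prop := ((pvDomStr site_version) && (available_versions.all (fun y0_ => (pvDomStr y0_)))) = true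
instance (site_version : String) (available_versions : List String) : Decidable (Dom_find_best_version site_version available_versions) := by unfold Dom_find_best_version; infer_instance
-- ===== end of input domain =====

-- B replaces A's build-candidate-list-then-max two-pass structure with a single
-- running-best pass over available_versions (objective: simpler; same asymptotic cost).

-- Shared helper: parse_version(v) = tuple(int(p) for p in v.split('.')); none = ValueError.
def pvParse? (v : String) : Option (List Int) :=
  go (PySem.Chars.splitOn v.toList ['.'])
where
  go : List (List Char) → Option (List Int)
    | [] => some []
    | p :: ps =>
      match PySem.Int.ofChars? p, go ps with
      | some n, some t => some (n :: t)
      | _, _ => none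

-- Python tuple '<' on int tuples (lexicographic, shorter prefix is smaller).
def pvLexLt : List Int → List Int → Bool
  | [], [] => false
  | [], _ :: _ => true
  | _ :: _, [] => false
  | a :: as_, b :: bs => if a < b then true else if b < a then false else pvLexLt as_ bs

-- Python tuple '<=' on int tuples.
def pvLexLe : List Int → List Int → Bool
  | [], _ => true
  | _ :: _, [] => false
  | a :: as_, b :: bs => if a < b then true else if b < a then false else pvLexLe as_ bs

-- ===== PORT A =====
-- Python's max(candidates, key=λx: x[0]) : first element wins ties, replace on strictly greater key.
def pvMaxStep (best x : List Int × String) : List Int × String :=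
  if pvLexLt best.1 x.1 then x else best

def find_best_version (site_version : String) (available_versions : List String) : Option String :=
  match pvParse? site_version with
  | none => none
  | some site_v =>
    let candidates := available_versions.foldl (fun acc v =>
      match pvParse? v with
      | none => acc
      | some vp => if pvLexLe vp site_v then acc ++ [(vp, v)] else acc) []
    match candidates with
    | [] => none
    | c :: cs => some (cs.foldl pvMaxStep c).2

-- ===== PORT B =====
def pvBStep (site_v : List Int) (best : Option (List Int × String)) (v : String) :
    Option (List Int × String) :=
  match pvParse? v with
  | none => best
  | some vp =>
    if pvLexLe vp site_v && (match best with | none => true | some b => pvLexLt b.1 vp) then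
      some (vp, v)
    else best

def find_best_version_alt (site_version : String) (available_versions : List String) : Option String :=
  match pvParse? site_version with
  | none => none
  | some site_v =>
    match available_versions.foldl (pvBStep site_v) none with
    | none => none
    | some b => some b.2

-- ===== PRECONDITION & SPEC =====
def Spec_find_best_version (site_version : String) (available_versions : List String) (out : Option String) : Prop := out = find_best_version_alt site_version available_versions
instance (site_version : String) (available_versions : List String) (out : Option String) : Decidable (Spec_find_best_version site_version available_versions out) := by unfold Spec_find_best_version; infer_instance

-- ===== CLAIM (what is proved, stated in full; the proofs are below) =====
def Claim_equal_find_best_version : Prop := ∀ (site_version : String) (available_versions : List String), Dom_find_best_version site_version available_versions → Spec_find_best_version site_version available_versions (find_best_version site_version available_versions)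

-- ===== LEMMAS AND PROOFS =====

-- Candidate of one version string, as A collects it.
def pvCand (site_v : List Int) (v : String) : List (List Int × String) :=
  match pvParse? v with
  | none => []
  | some vp => if pvLexLe vp site_v then [(vp, v)] else []

def pvCands (site_v : List Int) (vs : List String) : List (List Int × String) :=
  vs.flatMap (pvCand site_v)

-- Option-combining step shared by the two reformulations.
def pvComb (o : Option (List Int × String)) (x : List Int × String) : Option (List Int × String) :=
  match o with
  | none => some x
  | some b => some (pvMaxStep b x)

lemma candidates_eq (site_v : List Int) (vs : List String) (acc : List (List Int × String)) :
    vs.foldl (fun acc v =>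
      match pvParse? v with
      | none => acc
      | some vp => if pvLexLe vp site_v then acc ++ [(vp, v)] else acc) acc
    = acc ++ pvCands site_v vs := by
  induction vs generalizing acc with
  | nil => simp [pvCands]
  | cons v vs ih =>
    simp only [List.foldl_cons, pvCands, List.flatMap_cons]
    rw [ih]
    cases h : pvParse? v with
    | none => simp [pvCand, h, pvCands]
    | some vp =>
      by_cases hle : pvLexLe vp site_v
      · simp [pvCand, h, hle, pvCands]
      · simp [pvCand, h, hle, pvCands]

lemma maxStep_fold (cs : List (List Int × String)) (c : List Int × String) :
    cs.foldl pvComb (some c) = some (cs.foldl pvMaxStep c) := by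
  induction cs generalizing c with
  | nil => rfl
  | cons x xs ih => simp only [List.foldl_cons, pvComb]; exact ih _

lemma bstep_fold (site_v : List Int) (vs : List String) (o : Option (List Int × String)) :
    vs.foldl (pvBStep site_v) o = (pvCands site_v vs).foldl pvComb o := by
  induction vs generalizing o with
  | nil => rfl
  | cons v vs ih =>
    simp only [List.foldl_cons, pvCands, List.flatMap_cons, List.foldl_append]
    rw [ih]
    congr 1
    cases h : pvParse? v with
    | none => simp [pvBStep, pvCand, h]
    | some vp =>
      by_cases hle : pvLexLe vp site_v
      · cases o with
        | none => simp [pvBStep, pvCand, h, hle, pvComb]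
        | some b =>
          simp only [pvBStep, pvCand, h, hle, List.foldl_cons, List.foldl_nil, pvComb,
            Bool.true_and, if_pos]
          by_cases hlt : pvLexLt b.1 vp
          · simp [hlt, pvMaxStep]
          · simp [hlt, pvMaxStep]
      · simp [pvBStep, pvCand, h, hle]

-- ===== VERDICT (by name: the statement is the Claim_ definition above) =====
theorem find_best_version_spec : Claim_equal_find_best_version := by
  intro site_version available_versions _
  unfold Spec_find_best_version find_best_version find_best_version_alt
  cases hs : pvParse? site_version with
  | none => rfl
  | some site_v =>
    simp only
    rw [candidates_eq site_v available_versions [], bstep_fold site_v available_versions none,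
      List.nil_append]
    cases hc : pvCands site_v available_versions with
    | nil => rfl
    | cons c cs =>
      simp only [List.foldl_cons, pvComb, maxStep_fold]
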